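-- pv_equiv track=rewrite | github.com/ericbinnendyk/coxeter-diagram-simplex-divider | coxeter_diagram_text_parser.py | longest_paths
-- ===== SOURCE A (Python) =====
-- def longest_paths(coxeter_matrix):
--     n = len(coxeter_matrix)
--     # use an intermediate recursive function storing (as an argument) the list of record breaking paths, the length, and the list of previously seen vertices.
--     # hm, I suppose I could make this more efficient by only updating record_path and record_length when I reach a dead end; i.e. when len(unseen_neighbors) == 0
--     # in that case, record_paths and record_length would represent the longest *complete* path found
--     def helper_fn(record_paths, record_length, prev_verts):
--         # if we've seen previous vertices, only look at the neighbors of the last one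
--         if len(prev_verts) > 0:
--             i = prev_verts[-1]
--             unseen_neighbors = [j for j in range(n) if coxeter_matrix[i][j] != 2 and j not in prev_verts]
--         # otherwise, look at all vertices
--         else:
--             unseen_neighbors = list(range(n))
--         if len(unseen_neighbors) == 0:
--             return record_paths, record_length # I'm not sure what we should return yet
--         # update running tally of record path(s)
--         for j in unseen_neighbors:
--             new_path = prev_verts + [j]
--             # tied for longest path
--             if len(new_path) == record_length:
--                 record_paths.append(new_path)
--             # new longer path
--             elif len(new_path) > record_length:
--                 record_paths = [new_path]
--                 record_length = len(new_path)
--             # recurse on neighbor node to find longer paths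
--             record_paths, record_length = helper_fn(record_paths, record_length, new_path)
--         return record_paths, record_length
--     return helper_fn([], 0, [])
-- ===== SOURCE B (Python) =====
-- def longest_paths(coxeter_matrix):
--     n = len(coxeter_matrix)
--
--     # Phase 1: generator yielding every simple path in pre-order
--     # (start vertices and neighbors in increasing index order).
--     def paths_from(path):
--         yield path
--         i = path[-1]
--         for j in range(n):
--             if coxeter_matrix[i][j] != 2 and j not in path:
--                 yield from paths_from(path + [j])
--
--     # Phase 2: one pass keeping all paths of the running maximum length.
--     best_paths, best_len = [], 0
--     for s in range(n):
--         for p in paths_from([s]):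
--             if len(p) > best_len:
--                 best_paths, best_len = [p], len(p)
--             elif len(p) == best_len:
--                 best_paths.append(p)
--     return best_paths, best_len
-- ===== Notes on version B (the rewrite author's own statement) =====
-- stated objective: simpler
-- what changed: A threads the record list/length through a recursive helper that updates the record at every step of its DFS; B separates the two concerns into a generator that yields every simple path in pre-order and a single fold that keeps all paths of the running maximum length.
-- outside the precondition, e.g. on longest_paths([[1, 3], [3]]): A raises IndexError, B raises IndexError
import Mathlib
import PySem

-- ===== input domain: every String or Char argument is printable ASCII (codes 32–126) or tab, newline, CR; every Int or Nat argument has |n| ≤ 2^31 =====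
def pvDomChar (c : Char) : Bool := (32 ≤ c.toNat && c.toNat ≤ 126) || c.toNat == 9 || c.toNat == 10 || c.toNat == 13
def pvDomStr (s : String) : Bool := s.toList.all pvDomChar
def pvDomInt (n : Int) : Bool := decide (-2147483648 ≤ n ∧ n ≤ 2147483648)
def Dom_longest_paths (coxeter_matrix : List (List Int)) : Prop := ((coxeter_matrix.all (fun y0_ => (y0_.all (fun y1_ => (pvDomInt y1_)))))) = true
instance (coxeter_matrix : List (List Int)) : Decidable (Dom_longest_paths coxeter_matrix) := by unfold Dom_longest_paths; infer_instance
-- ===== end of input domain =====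

-- B replaces A's record-threading recursion by a plain pre-order path enumeration followed
-- by one fold keeping the running maximum (objective: simpler decomposition, same cost).

-- shared matrix-indexing helper: coxeter_matrix[i][j] (total stand-in; in range on Pre_)
def pvMat (cox : List (List Int)) (i j : Int) : Int :=
  (PySem.List.pyGet? ((PySem.List.pyGet? cox i).getD []) j).getD 0

-- ===== PORT A =====
-- A's helper_fn: fuel only makes the recursion total; with the top call's fuel it never runs out
mutual
def pvHelperA (cox : List (List Int)) (n : Int) :
    Nat → List (List Int) × Int → List Int → List (List Int) × Int
  | 0, record, _ => record
  | fuel+1, record, prev_verts =>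
    let unseen :=
      if prev_verts.length > 0 then
        (PySem.List.pyRange 0 n 1).filter (fun j =>
          pvMat cox ((PySem.List.pyGet? prev_verts (-1)).getD 0) j != 2 && !prev_verts.contains j)
      else PySem.List.pyRange 0 n 1
    if unseen.length = 0 then record
    else pvLoopA cox n fuel record prev_verts unseen
termination_by f _ _ => (f, 0)

def pvLoopA (cox : List (List Int)) (n : Int) :
    Nat → List (List Int) × Int → List Int → List Int → List (List Int) × Int
  | _, record, _, [] => record
  | fuel, record, prev_verts, j :: rest =>
    let new_path := prev_verts ++ [j]
    let record1 :=
      if (new_path.length : Int) = record.2 then (record.1 ++ [new_path], record.2)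
      else if (new_path.length : Int) > record.2 then ([new_path], (new_path.length : Int))
      else record
    pvLoopA cox n fuel (pvHelperA cox n fuel record1 new_path) prev_verts rest
termination_by f _ _ js => (f, js.length + 1)
end

def longest_paths (coxeter_matrix : List (List Int)) : List (List Int) × Int :=
  pvHelperA coxeter_matrix (coxeter_matrix.length : Int) (coxeter_matrix.length + 1) ([], 0) []

-- ===== PORT B =====
-- B's generator paths_from, fueled to be total; fuel n suffices on Pre_
def pvPathsFromB (cox : List (List Int)) (n : Int) : Nat → List Int → List (List Int)
  | 0, path => [path]
  | fuel+1, path =>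
    path :: ((PySem.List.pyRange 0 n 1).filter (fun j =>
        pvMat cox ((PySem.List.pyGet? path (-1)).getD 0) j != 2 && !path.contains j)).flatMap
      (fun j => pvPathsFromB cox n fuel (path ++ [j]))

-- B's phase-2 accumulator body
def pvBestB (acc : List (List Int) × Int) (p : List Int) : List (List Int) × Int :=
  if (p.length : Int) > acc.2 then ([p], (p.length : Int))
  else if (p.length : Int) = acc.2 then (acc.1 ++ [p], acc.2)
  else acc

def longest_paths_alt (coxeter_matrix : List (List Int)) : List (List Int) × Int :=
  ((PySem.List.pyRange 0 (coxeter_matrix.length : Int) 1).flatMap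
      (fun s => pvPathsFromB coxeter_matrix (coxeter_matrix.length : Int) coxeter_matrix.length [s])).foldl
    pvBestB ([], 0)

-- ===== PRECONDITION & SPEC =====
-- Pre_ excludes exactly the inputs where A raises IndexError: a row shorter than the matrix
-- (coxeter_matrix[i][j] with j < n out of range). A returns on every square-or-wider matrix.
def Pre_longest_paths (coxeter_matrix : List (List Int)) : Prop :=
  ∀ row ∈ coxeter_matrix, coxeter_matrix.length ≤ row.length
instance (coxeter_matrix : List (List Int)) : Decidable (Pre_longest_paths coxeter_matrix) := by
  unfold Pre_longest_paths; infer_instance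

def pvWitness_longest_paths : List (List Int) := [[1, 3, 2], [3, 1, 4], [2, 4, 1]]

def Spec_longest_paths (coxeter_matrix : List (List Int)) (out : List (List Int) × Int) : Prop := out = longest_paths_alt coxeter_matrix
instance (coxeter_matrix : List (List Int)) (out : List (List Int) × Int) : Decidable (Spec_longest_paths coxeter_matrix out) := by unfold Spec_longest_paths; infer_instance

-- ===== CLAIM (what is proved, stated in full; the proofs are below) =====
def Claim_equal_longest_paths : Prop := ∀ (coxeter_matrix : List (List Int)), Dom_longest_paths coxeter_matrix → Pre_longest_paths coxeter_matrix → Spec_longest_paths coxeter_matrix (longest_paths coxeter_matrix)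

-- ===== LEMMAS AND PROOFS =====

-- the stream of paths A's recursion visits strictly below prev_verts, at a given fuel
def pvD (cox : List (List Int)) (n : Int) : Nat → List Int → List (List Int)
  | 0, _ => []
  | fuel+1, prev =>
    (if prev.length > 0 then
        (PySem.List.pyRange 0 n 1).filter (fun j =>
          pvMat cox ((PySem.List.pyGet? prev (-1)).getD 0) j != 2 && !prev.contains j)
      else PySem.List.pyRange 0 n 1).flatMap
      (fun j => (prev ++ [j]) :: pvD cox n fuel (prev ++ [j]))

lemma pvStep_eq (record : List (List Int) × Int) (np : List Int) :
    (if (np.length : Int) = record.2 then (record.1 ++ [np], record.2)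
     else if (np.length : Int) > record.2 then ([np], (np.length : Int))
     else record) = pvBestB record np := by
  unfold pvBestB
  split_ifs <;> first | rfl | omega

lemma pvLoopA_eq (cox : List (List Int)) (n : Int) (f : Nat)
    (ih : ∀ (record : List (List Int) × Int) (prev : List Int),
      pvHelperA cox n f record prev = (pvD cox n f prev).foldl pvBestB record) :
    ∀ (js : List Int) (record : List (List Int) × Int) (prev : List Int),
      pvLoopA cox n f record prev js =
        (js.flatMap (fun j => (prev ++ [j]) :: pvD cox n f (prev ++ [j]))).foldl pvBestB record := by
  intro js
  induction js with
  | nil => intro record prev; rw [pvLoopA]; simp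
  | cons j rest ihr =>
    intro record prev
    rw [pvLoopA]
    simp only [pvStep_eq, ihr, ih, List.flatMap_cons, List.foldl_append, List.foldl_cons]

lemma pvHelperA_eq (cox : List (List Int)) (n : Int) :
    ∀ (f : Nat) (record : List (List Int) × Int) (prev : List Int),
      pvHelperA cox n f record prev = (pvD cox n f prev).foldl pvBestB record := by
  intro f
  induction f with
  | zero => intro record prev; rw [pvHelperA, pvD]; rfl
  | succ f ih =>
    intro record prev
    rw [pvHelperA, pvD]
    generalize (if prev.length > 0 then
        (PySem.List.pyRange 0 n 1).filter (fun j =>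
          pvMat cox ((PySem.List.pyGet? prev (-1)).getD 0) j != 2 && !prev.contains j)
      else PySem.List.pyRange 0 n 1) = u
    match u with
    | [] => simp
    | j :: rest =>
      rw [if_neg (by simp)]
      exact pvLoopA_eq cox n f ih (j :: rest) record prev

lemma pvPathsFromB_eq (cox : List (List Int)) (n : Int) :
    ∀ (f : Nat) (p : List Int), p ≠ [] →
      pvPathsFromB cox n f p = p :: pvD cox n f p := by
  intro f
  induction f with
  | zero => intro p hp; rw [pvPathsFromB, pvD]
  | succ f ih =>
    intro p hp
    rw [pvPathsFromB, pvD, if_pos (List.length_pos_of_ne_nil hp)]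
    congr 1
    refine List.flatMap_congr (fun j _ => ?_)
    exact ih (p ++ [j]) (by simp)

-- ===== VERDICT (by name: the statement is the Claim_ definition above) =====
theorem longest_paths_spec : Claim_equal_longest_paths := by
  intro cox _ _
  show longest_paths cox = longest_paths_alt cox
  rw [longest_paths, longest_paths_alt, pvHelperA_eq, pvD]
  simp only [List.length_nil, gt_iff_lt, lt_self_iff_false, if_false, List.nil_append]
  congr 1
  refine List.flatMap_congr (fun j _ => ?_)
  exact (pvPathsFromB_eq cox _ cox.length [j] (by simp)).symm
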